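-- pv_equiv track=rewrite | github.com/posl/comment_recommendation | script/mod_gen/1_time/zh/177_B/3.py | solve
-- ===== SOURCE A (Python) =====
-- def solve(s,t):
--     n = len(s)
--     m = len(t)
--     dp = [[0]*(m+1) for i in range(n+1)]
--     for i in range(1,n+1):
--         for j in range(1,m+1):
--             if s[i-1]==t[j-1]:
--                 dp[i][j]=dp[i-1][j-1]+1
--             else:
--                 dp[i][j]=dp[i-1][j]
--     return m-dp[n][m]
-- ===== SOURCE B (Python) =====
-- def solve(s, t):
--     i = len(s)
--     j = len(t)
--     while i > 0 and j > 0: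
--         if s[i - 1] == t[j - 1]:
--             j -= 1
--         i -= 1
--     return j
-- ===== Notes on version B (the rewrite author's own statement) =====
-- stated objective: faster
-- what changed: Replaces the O(n*m) DP table (whose recurrence is in fact a greedy right-to-left match of t against s) by a single two-pointer scan from the right ends of both strings.
import Mathlib
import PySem

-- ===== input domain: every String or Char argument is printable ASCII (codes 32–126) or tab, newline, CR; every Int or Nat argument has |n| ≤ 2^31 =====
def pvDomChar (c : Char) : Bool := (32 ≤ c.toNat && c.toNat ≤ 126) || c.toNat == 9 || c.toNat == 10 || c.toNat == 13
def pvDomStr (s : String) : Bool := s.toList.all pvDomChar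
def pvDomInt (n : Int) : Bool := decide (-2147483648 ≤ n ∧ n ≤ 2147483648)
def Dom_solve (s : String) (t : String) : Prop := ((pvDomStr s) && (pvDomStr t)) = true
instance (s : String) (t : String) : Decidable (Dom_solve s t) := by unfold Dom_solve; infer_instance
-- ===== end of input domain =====

-- B replaces A's O(n*m) DP table by the equivalent O(n+m) two-pointer greedy scan from the right.

-- ===== PORT A =====
-- body of A's inner loop: dp[i][j] = dp[i-1][j-1]+1 if s[i-1]==t[j-1] else dp[i-1][j]
-- (loop indices i, j are always nonnegative and in range, so the total pyGetD/pySetD are exact here)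
def aInner (sc tc : List Char) (i : Int) (dp : List (List Int)) (j : Int) : List (List Int) :=
  let v : Int :=
    if PySem.List.pyGetD sc (i-1) ' ' = PySem.List.pyGetD tc (j-1) ' '
    then PySem.List.pyGetD (PySem.List.pyGetD dp (i-1) []) (j-1) 0 + 1
    else PySem.List.pyGetD (PySem.List.pyGetD dp (i-1) []) j 0
  PySem.List.pySetD dp i (PySem.List.pySetD (PySem.List.pyGetD dp i []) j v)

-- A's outer-loop body: 'for j in range(1, m+1): …'
def aOuter (sc tc : List Char) (m : Int) (dp : List (List Int)) (i : Int) : List (List Int) :=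
  (PySem.List.pyRange 1 (m+1) 1).foldl (aInner sc tc i) dp

def solve (s : String) (t : String) : Int :=
  let sc := s.toList
  let tc := t.toList
  let n : Int := sc.length
  let m : Int := tc.length
  let dp0 : List (List Int) := List.replicate (n+1).toNat (List.replicate (m+1).toNat 0)
  let dp := (PySem.List.pyRange 1 (n+1) 1).foldl (aOuter sc tc m) dp0
  m - PySem.List.pyGetD (PySem.List.pyGetD dp n []) m 0

-- ===== PORT B =====
-- B's while loop: i, j count how many characters of s, t are still unscanned (both stay ≥ 0)
def altGo (sc tc : List Char) : Nat → Nat → Nat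
  | 0, j => j
  | _+1, 0 => 0
  | i+1, j+1 =>
    if sc.getD i ' ' = tc.getD j ' ' then altGo sc tc i j else altGo sc tc i (j+1)

def solve_alt (s : String) (t : String) : Int :=
  let sc := s.toList
  let tc := t.toList
  (altGo sc tc sc.length tc.length : Int)

-- ===== PRECONDITION & SPEC =====
def Spec_solve (s : String) (t : String) (out : Int) : Prop := out = solve_alt s t
instance (s : String) (t : String) (out : Int) : Decidable (Spec_solve s t out) := by unfold Spec_solve; infer_instance

-- ===== CLAIM (what is proved, stated in full; the proofs are below) =====
def Claim_equal_solve : Prop := ∀ (s : String) (t : String), Dom_solve s t → Spec_solve s t (solve s t)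

-- ===== LEMMAS AND PROOFS =====

-- mathematical reading of A's table: F i j = dp[i][j]
def F (sc tc : List Char) : Nat → Nat → Int
  | 0, _ => 0
  | _+1, 0 => 0
  | i+1, j+1 =>
    if sc.getD i ' ' = tc.getD j ' ' then F sc tc i j + 1 else F sc tc i (j+1)

lemma F_eq_altGo (sc tc : List Char) : ∀ i j, F sc tc i j = (j : Int) - (altGo sc tc i j : Int) := by
  intro i
  induction i with
  | zero => intro j; cases j <;> simp [F, altGo]
  | succ i ih =>
    intro j
    cases j with
    | zero => simp [F, altGo]
    | succ j =>
      simp only [F, altGo]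
      split
      · rw [ih]; push_cast; ring
      · rw [ih]

lemma getD_set_self {α : Type} (xs : List α) (a : Nat) (v d : α) (h : a < xs.length) :
    (xs.set a v).getD a d = v := by
  simp [List.getD, h]

lemma getD_set_ne {α : Type} (xs : List α) (a b : Nat) (v d : α) (h : b ≠ a) :
    (xs.set a v).getD b d = xs.getD b d := by
  simp [List.getD, List.getElem?_set_ne (Ne.symm h)]

-- invariant after the first k outer iterations
def Tab (sc tc : List Char) (k : Nat) (dp : List (List Int)) : Prop :=
  dp.length = sc.length + 1 ∧
  (∀ i, i ≤ sc.length → (dp.getD i []).length = tc.length + 1) ∧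
  (∀ i, i ≤ sc.length → ∀ j, j ≤ tc.length →
     (dp.getD i []).getD j 0 = if i ≤ k then F sc tc i j else 0)

-- invariant inside outer iteration k+1, after the first l inner iterations
def Row (sc tc : List Char) (k l : Nat) (dp : List (List Int)) : Prop :=
  dp.length = sc.length + 1 ∧
  (∀ i, i ≤ sc.length → (dp.getD i []).length = tc.length + 1) ∧
  (∀ i, i ≤ sc.length → ∀ j, j ≤ tc.length →
     (dp.getD i []).getD j 0 =
       if i = k + 1 then (if j ≤ l then F sc tc i j else 0)
       else if i ≤ k then F sc tc i j else 0)

lemma row_of_tab (sc tc : List Char) (k : Nat) (dp : List (List Int))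
    (h : Tab sc tc k dp) : Row sc tc k 0 dp := by
  obtain ⟨h1, h2, h3⟩ := h
  refine ⟨h1, h2, fun i hi j hj => ?_⟩
  rw [h3 i hi j hj]
  by_cases hik : i = k + 1
  · subst hik
    have : ¬ (k + 1 ≤ k) := by omega
    simp [this]
    intro hj0; subst hj0; simp [F]
  · simp [hik]

lemma tab_of_row (sc tc : List Char) (k : Nat) (dp : List (List Int))
    (h : Row sc tc k tc.length dp) : Tab sc tc (k+1) dp := by
  obtain ⟨h1, h2, h3⟩ := h
  refine ⟨h1, h2, fun i hi j hj => ?_⟩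
  rw [h3 i hi j hj]
  by_cases hik : i = k + 1
  · subst hik; simp [hj]
  · simp only [hik, if_false]
    split_ifs <;> first | rfl | omega

lemma row_step (sc tc : List Char) (k l : Nat) (dp : List (List Int))
    (hk : k + 1 ≤ sc.length) (hl : l + 1 ≤ tc.length)
    (h : Row sc tc k l dp) :
    Row sc tc k (l+1) (aInner sc tc ((k:Int)+1) dp ((l:Int)+1)) := by
  obtain ⟨h1, h2, h3⟩ := h
  have ek : ((k:Int)+1) = ((k+1 : Nat) : Int) := by push_cast; ring
  have el : ((l:Int)+1) = ((l+1 : Nat) : Int) := by push_cast; ring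
  have ek1 : ((k:Int)+1-1) = ((k : Nat) : Int) := by ring
  have el1 : ((l:Int)+1-1) = ((l : Nat) : Int) := by ring
  unfold aInner
  rw [ek1, el1, ek, el]
  simp only [PySem.List.pyGetD_natCast, PySem.List.pySetD_natCast]
  have hrowk : (dp.getD k []).getD l 0 = F sc tc k l := by
    rw [h3 k (by omega) l (by omega)]; simp
  have hrowk' : (dp.getD k []).getD (l+1) 0 = F sc tc k (l+1) := by
    rw [h3 k (by omega) (l+1) (by omega)]; simp
  have hv : (if sc.getD k ' ' = tc.getD l ' '
      then (dp.getD k []).getD l 0 + 1 else (dp.getD k []).getD (l+1) 0)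
      = F sc tc (k+1) (l+1) := by
    rw [hrowk, hrowk']; simp [F]
  rw [hv]
  have hlen : (k+1) < dp.length := by omega
  have hrlen : (l+1) < (dp.getD (k+1) []).length := by
    rw [h2 (k+1) (by omega)]; omega
  refine ⟨by simp [h1], fun i hi => ?_, fun i hi j hj => ?_⟩
  · by_cases hik : i = k + 1
    · subst hik
      rw [getD_set_self dp _ _ _ hlen, List.length_set]
      exact h2 (k+1) (by omega)
    · rw [getD_set_ne dp _ _ _ _ hik]; exact h2 i hi
  · by_cases hik : i = k + 1
    · subst hik
      rw [getD_set_self dp _ _ _ hlen]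
      by_cases hjl : j = l + 1
      · subst hjl
        rw [getD_set_self _ _ _ _ hrlen]
        simp
      · rw [getD_set_ne _ _ _ _ _ hjl]
        rw [h3 (k+1) hi j hj]
        split_ifs <;> first | rfl | omega
    · rw [getD_set_ne dp _ _ _ _ hik]
      rw [h3 i hi j hj]
      simp [hik]

lemma inner_fold (sc tc : List Char) (k : Nat) (dp : List (List Int))
    (hk : k + 1 ≤ sc.length) (h : Row sc tc k 0 dp) :
    ∀ L, L ≤ tc.length →
      Row sc tc k L ((PySem.List.pyRange 1 ((L:Int)+1) 1).foldl (aInner sc tc ((k:Int)+1)) dp) := by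
  intro L
  induction L with
  | zero =>
    intro _
    rw [PySem.List.pyRange_one_eq_nil (by omega)]
    simpa using h
  | succ L ih =>
    intro hL
    have e : ((L+1 : Nat) : Int) + 1 = (((L:Int)+1) + 1) := by push_cast; ring
    rw [e, PySem.List.pyRange_one_succ_right (by omega), List.foldl_append]
    simp only [List.foldl_cons, List.foldl_nil]
    exact row_step sc tc k L _ hk (by omega) (ih (by omega))

lemma outer_step (sc tc : List Char) (k : Nat) (dp : List (List Int))
    (hk : k + 1 ≤ sc.length) (h : Tab sc tc k dp) :
    Tab sc tc (k+1) (aOuter sc tc (tc.length : Int) dp ((k:Int)+1)) := by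
  unfold aOuter
  exact tab_of_row sc tc k _
    (inner_fold sc tc k dp hk (row_of_tab sc tc k dp h) tc.length (le_refl _))

lemma tab_init (sc tc : List Char) :
    Tab sc tc 0 (List.replicate (((sc.length : Int))+1).toNat
      (List.replicate (((tc.length : Int))+1).toNat (0 : Int))) := by
  have en : (((sc.length : Int))+1).toNat = sc.length + 1 := by omega
  have em : (((tc.length : Int))+1).toNat = tc.length + 1 := by omega
  rw [en, em]
  refine ⟨by simp, fun i hi => ?_, fun i hi j hj => ?_⟩
  · rw [List.getD_eq_getElem?_getD, List.getElem?_replicate]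
    simp [Nat.lt_succ_of_le hi]
  · have hrow : (List.replicate (sc.length + 1) (List.replicate (tc.length + 1) (0:Int))).getD i []
        = List.replicate (tc.length + 1) 0 := by
      rw [List.getD_eq_getElem?_getD, List.getElem?_replicate]
      simp [Nat.lt_succ_of_le hi]
    rw [hrow]
    have hz : (List.replicate (tc.length + 1) (0:Int)).getD j 0 = 0 := by
      rw [List.getD_eq_getElem?_getD, List.getElem?_replicate]
      split <;> simp
    rw [hz]
    split_ifs with h0
    · have : i = 0 := by omega
      subst this
      have hF : F sc tc 0 j = 0 := by cases j <;> simp [F]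
      exact hF.symm
    · rfl

lemma outer_fold (sc tc : List Char) :
    ∀ K, K ≤ sc.length →
      Tab sc tc K ((PySem.List.pyRange 1 ((K:Int)+1) 1).foldl
        (aOuter sc tc (tc.length : Int))
        (List.replicate (((sc.length : Int))+1).toNat
          (List.replicate (((tc.length : Int))+1).toNat (0 : Int)))) := by
  intro K
  induction K with
  | zero =>
    intro _
    rw [PySem.List.pyRange_one_eq_nil (by omega)]
    exact tab_init sc tc
  | succ K ih =>
    intro hK
    have e : ((K+1 : Nat) : Int) + 1 = (((K:Int)+1) + 1) := by push_cast; ring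
    rw [e, PySem.List.pyRange_one_succ_right (by omega), List.foldl_append]
    simp only [List.foldl_cons, List.foldl_nil]
    exact outer_step sc tc K _ hK (ih (by omega))

-- ===== VERDICT (by name: the statement is the Claim_ definition above) =====
theorem solve_spec : Claim_equal_solve := by
  unfold Claim_equal_solve Spec_solve
  intro s t _
  unfold solve solve_alt
  set sc := s.toList with hsc
  set tc := t.toList with htc
  have htab := outer_fold sc tc sc.length (le_refl _)
  obtain ⟨h1, h2, h3⟩ := htab
  simp only [PySem.List.pyGetD_natCast]
  rw [h3 sc.length (le_refl _) tc.length (le_refl _)]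
  simp only [le_refl, if_pos]
  rw [F_eq_altGo]
  ring
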